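-- pv_equiv track=rewrite | github.com/dixitdevarshi/RoboJEC | robojec/pipeline/interview_runner.py | _distribute_hobbies
-- ===== SOURCE A (Python) =====
-- from typing import Any, Dict, List, Optional, Tuple
--
-- def _distribute_hobbies(hobbies: List[str], num_questions: int) -> List[str]:
--     """
--     Return a list of length num_questions where each entry is the hobby
--     that question slot should focus on.
--
--     1 hobby  → all slots get that hobby
--     2 hobbies → alternate: [h1, h2, h1] for 3 questions
--     3+ hobbies → pick first 2, alternate
--     """
--     if len(hobbies) == 1:
--         return [hobbies[0]] * num_questions
--
--     # use at most 2 hobbies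
--     h1, h2 = hobbies[0], hobbies[1]
--     plan   = []
--     for i in range(num_questions):
--         plan.append(h1 if i % 2 == 0 else h2)
--     return plan
-- ===== SOURCE B (Python) =====
-- from typing import List
--
-- def _distribute_hobbies(hobbies: List[str], num_questions: int) -> List[str]:
--     # Doubling the list makes the single-hobby case a degenerate alternation
--     # (h1 == h2), so no special branch is needed.
--     h1, h2 = (hobbies * 2)[:2]
--     n = max(num_questions, 0)
--     return [h1, h2] * (n // 2) + [h1] * (n % 2)
-- ===== Notes on version B (the rewrite author's own statement) =====
-- stated objective: simpler
-- what changed: Drops A's single-hobby branch by drawing h1,h2 from the doubled list (hobbies*2)[:2], and replaces the per-index modulo loop with block repetition [h1,h2]*(n//2)+[h1]*(n%2) with n clamped at 0.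
import Mathlib
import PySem

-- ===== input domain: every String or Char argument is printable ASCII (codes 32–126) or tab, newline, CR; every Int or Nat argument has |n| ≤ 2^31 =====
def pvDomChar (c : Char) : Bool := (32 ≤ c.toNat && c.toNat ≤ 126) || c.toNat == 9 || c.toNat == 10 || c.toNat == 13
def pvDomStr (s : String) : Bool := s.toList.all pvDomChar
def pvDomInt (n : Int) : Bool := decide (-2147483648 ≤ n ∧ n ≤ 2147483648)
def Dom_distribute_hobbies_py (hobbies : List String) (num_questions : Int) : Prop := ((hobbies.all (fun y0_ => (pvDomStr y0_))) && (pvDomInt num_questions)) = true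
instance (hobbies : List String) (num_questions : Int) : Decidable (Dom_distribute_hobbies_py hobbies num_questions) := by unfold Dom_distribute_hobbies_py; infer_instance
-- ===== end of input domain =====

-- B has no single-hobby branch (it takes h1,h2 from the doubled list) and builds the plan
-- by block repetition instead of A's per-index modulo loop; objective: simpler.

-- ===== PORT A =====
def distribute_hobbies_py (hobbies : List String) (num_questions : Int) : List String :=
  if hobbies.length = 1 then
    List.replicate num_questions.toNat ((PySem.List.pyGet? hobbies 0).getD "")
  else
    let h1 := (PySem.List.pyGet? hobbies 0).getD ""
    let h2 := (PySem.List.pyGet? hobbies 1).getD ""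
    (PySem.List.pyRange 0 num_questions 1).foldl
      (fun plan i => plan ++ [if PySem.Int.mod i 2 = 0 then h1 else h2]) []

-- ===== PORT B =====
def distribute_hobbies_py_alt (hobbies : List String) (num_questions : Int) : List String :=
  -- h1, h2 = (hobbies * 2)[:2]  (raises for empty hobbies, which Pre_ excludes)
  let hh := hobbies ++ hobbies
  let h1 := (PySem.List.pyGet? hh 0).getD ""
  let h2 := (PySem.List.pyGet? hh 1).getD ""
  let n : Int := max num_questions 0
  (List.replicate (PySem.Int.floordiv n 2).toNat [h1, h2]).flatten
    ++ List.replicate (PySem.Int.mod n 2).toNat h1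

-- ===== PRECONDITION & SPEC =====
-- Pre_ excludes only the empty hobby list, on which A raises IndexError (and B a ValueError).
def Pre_distribute_hobbies_py (hobbies : List String) (num_questions : Int) : Prop := hobbies ≠ []
instance (hobbies : List String) (num_questions : Int) : Decidable (Pre_distribute_hobbies_py hobbies num_questions) := by unfold Pre_distribute_hobbies_py; infer_instance
def pvWitness_distribute_hobbies_py : List String × Int := (["chess", "hiking"], 5)

def Spec_distribute_hobbies_py (hobbies : List String) (num_questions : Int) (out : List String) : Prop := out = distribute_hobbies_py_alt hobbies num_questions
instance (hobbies : List String) (num_questions : Int) (out : List String) : Decidable (Spec_distribute_hobbies_py hobbies num_questions out) := by unfold Spec_distribute_hobbies_py; infer_instance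

-- ===== CLAIM (what is proved, stated in full; the proofs are below) =====
def Claim_equal_distribute_hobbies_py : Prop := ∀ (hobbies : List String) (num_questions : Int), Dom_distribute_hobbies_py hobbies num_questions → Pre_distribute_hobbies_py hobbies num_questions → Spec_distribute_hobbies_py hobbies num_questions (distribute_hobbies_py hobbies num_questions)

-- ===== LEMMAS AND PROOFS =====

-- flatten of k copies of [a,a] is 2k copies of a.
theorem pv_flatten_pair (a : String) (k : Nat) :
    (List.replicate k [a, a]).flatten = List.replicate (2 * k) a := by
  induction k with
  | zero => simp
  | succ k ih =>
    rw [List.replicate_succ, List.flatten_cons, ih,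
      show 2 * (k + 1) = 2 + 2 * k by ring, List.replicate_add]
    rfl

-- The alternating map over range m equals the block-repetition construction.
theorem pv_blocks (h1 h2 : String) (m : Nat) :
    (List.range m).map (fun i : Nat => if i % 2 = 0 then h1 else h2)
      = (List.replicate (m / 2) [h1, h2]).flatten ++ List.replicate (m % 2) h1 := by
  induction m with
  | zero => simp
  | succ m ih =>
    rw [List.range_succ, List.map_append, ih]
    rcases Nat.even_or_odd m with hm | hm
    · obtain ⟨k, hk⟩ := hm
      have h2d : (m + 1) / 2 = m / 2 := by omega
      have hmod : m % 2 = 0 := by omega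
      have hmod1 : (m + 1) % 2 = 1 := by omega
      simp [h2d, hmod, hmod1, List.replicate_succ]
    · obtain ⟨k, hk⟩ := hm
      have h2d : (m + 1) / 2 = m / 2 + 1 := by omega
      have hmod : m % 2 = 1 := by omega
      have hmod1 : (m + 1) % 2 = 0 := by omega
      simp [h2d, hmod, hmod1, List.replicate_succ' (n := m / 2)]

-- Shared arithmetic: B's clamped n, floordiv and mod reduced to Nat on n = m ≥ 0.
theorem pv_B_eval (h1 h2 : String) (m : Nat) :
    (List.replicate (PySem.Int.floordiv (max (m : Int) 0) 2).toNat [h1, h2]).flatten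
      ++ List.replicate (PySem.Int.mod (max (m : Int) 0) 2).toNat h1
    = (List.replicate (m / 2) [h1, h2]).flatten ++ List.replicate (m % 2) h1 := by
  have hmax : max (m : Int) 0 = (m : Int) := by omega
  have hfd : (PySem.Int.floordiv (m : Int) 2).toNat = m / 2 := by
    rw [show ((2 : Int) = ((2 : Nat) : Int)) by norm_num, PySem.Int.floordiv_natCast]
    omega
  have hmd : (PySem.Int.mod (m : Int) 2).toNat = m % 2 := by
    rw [show ((2 : Int) = ((2 : Nat) : Int)) by norm_num, PySem.Int.mod_natCast]
    omega
  rw [hmax, hfd, hmd]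

-- ===== VERDICT (by name: the statement is the Claim_ definition above) =====
theorem distribute_hobbies_py_spec : Claim_equal_distribute_hobbies_py := by
  intro hobbies num_questions _ hne
  unfold Spec_distribute_hobbies_py distribute_hobbies_py distribute_hobbies_py_alt
  rcases (by omega : num_questions ≤ 0 ∨ 0 < num_questions) with hn | hn
  · -- empty result on both sides
    have hr : PySem.List.pyRange 0 num_questions 1 = [] := by
      simp [PySem.List.pyRange]; omega
    have hmax : max num_questions 0 = 0 := by omega
    have ht : num_questions.toNat = 0 := by omega
    simp [hr, hmax, ht, PySem.Int.floordiv, PySem.Int.mod]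
  · obtain ⟨m, hm⟩ : ∃ m : Nat, num_questions = (m : Int) := ⟨num_questions.toNat, by omega⟩
    subst hm
    by_cases hl : hobbies.length = 1
    · -- hobbies = [a]: both sides are replicate m a
      obtain ⟨a, ha⟩ : ∃ a, hobbies = [a] := by
        cases hobbies with
        | nil => simp at hl
        | cons x xs => cases xs with
          | nil => exact ⟨x, rfl⟩
          | cons y ys => simp at hl
      subst ha
      simp only [if_pos hl]
      rw [pv_B_eval]
      simp only [List.cons_append, List.nil_append]
      have hg0 : (PySem.List.pyGet? [a, a] (0 : Int)).getD "" = a := by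
        simp [PySem.List.pyGet?, PySem.List.pyIdx?]
      have hg1 : (PySem.List.pyGet? [a, a] (1 : Int)).getD "" = a := by
        simp [PySem.List.pyGet?, PySem.List.pyIdx?]
      have hg : (PySem.List.pyGet? [a] (0 : Int)).getD "" = a := by
        simp [PySem.List.pyGet?, PySem.List.pyIdx?]
      rw [hg0, hg1, hg, Int.toNat_natCast]
      have : List.replicate (m / 2 * 2) a ++ List.replicate (m % 2) a = List.replicate m a := by
        rw [← List.replicate_add]; congr 1; omega
      rw [pv_flatten_pair, ← this]
      congr 2
      omega
    · -- length ≥ 2: h1, h2 of the doubled list agree with A's, then block lemma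
      have hlen2 : 2 ≤ hobbies.length := by
        rcases hobbies with _ | ⟨x, _ | ⟨y, ys⟩⟩
        · exact absurd rfl hne
        · exact absurd rfl hl
        · simp
      simp only [if_neg hl]
      have hg0 : (PySem.List.pyGet? (hobbies ++ hobbies) 0).getD ""
          = (PySem.List.pyGet? hobbies 0).getD "" := by
        rw [PySem.List.pyGet?_zero, PySem.List.pyGet?_zero,
          List.getElem?_append_left (by omega : 0 < hobbies.length)]
      have hg1 : (PySem.List.pyGet? (hobbies ++ hobbies) 1).getD ""
          = (PySem.List.pyGet? hobbies 1).getD "" := by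
        rw [show (1 : Int) = ((1 : Nat) : Int) from rfl,
          PySem.List.pyGet?_natCast, PySem.List.pyGet?_natCast,
          List.getElem?_append_left (by omega : 1 < hobbies.length)]
      rw [hg0, hg1, pv_B_eval]
      rw [PySem.List.foldl_append_singleton_eq_map, PySem.List.pyRange_zero_natCast, List.map_map]
      rw [← pv_blocks]
      apply List.map_congr_left
      intro i _
      simp only [Function.comp]
      have : PySem.Int.mod (i : Int) 2 = ((i % 2 : Nat) : Int) := by
        rw [show ((2 : Int) = ((2 : Nat) : Int)) by norm_num, PySem.Int.mod_natCast]
      rw [this]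
      by_cases hp : i % 2 = 0 <;> simp [hp]
      omega
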